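-- pv_equiv track=rewrite | github.com/manyizzy/python-projects | caharactercount.py | solve
-- ===== SOURCE A (Python) =====
-- def solve(string):
--     output = {}
--     count = 0
--     for i in string:
--         keys =output.keys()
--         if i not in keys:
--             output[i] = 1
--             count += 1
--         else:
--             output[i] +=1
--
--     return output,count
-- ===== SOURCE B (Python) =====
-- def solve(string):
--     output = {c: string.count(c) for c in string}
--     return output, len(output)
-- ===== Notes on version B (the rewrite author's own statement) =====
-- stated objective: simpler
-- what changed: Replaces the incremental membership-test-and-increment loop with a dict comprehension that recomputes each character's frequency via string.count, and reads the distinct count off as len(output).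
import Mathlib
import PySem

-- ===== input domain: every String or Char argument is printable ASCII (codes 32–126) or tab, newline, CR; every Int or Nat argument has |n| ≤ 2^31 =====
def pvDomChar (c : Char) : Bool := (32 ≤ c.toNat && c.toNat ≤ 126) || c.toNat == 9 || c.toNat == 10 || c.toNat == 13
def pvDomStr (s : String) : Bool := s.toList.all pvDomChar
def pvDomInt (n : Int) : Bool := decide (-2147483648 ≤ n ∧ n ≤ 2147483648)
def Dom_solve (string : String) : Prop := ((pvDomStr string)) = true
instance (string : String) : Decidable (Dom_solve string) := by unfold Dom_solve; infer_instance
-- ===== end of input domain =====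

-- B replaces A's incremental count-dict loop by a dict comprehension recomputing each
-- frequency with string.count plus len(output) for the distinct count (simpler, not faster).

-- ===== PORT A =====
-- literal port of A: one pass, 'if i not in output.keys(): output[i] = 1; count += 1 else: output[i] += 1'
def solve (string : String) : (List (String × Int)) × Int :=
  let r := string.toList.foldl
    (fun (st : PySem.Dict String Int × Int) i =>
      if (String.ofList [i]) ∉ st.1.keys then
        (st.1.insert (String.ofList [i]) 1, st.2 + 1)
      else
        (st.1.modify (String.ofList [i]) 0 (· + 1), st.2))
    (PySem.Dict.empty, 0)
  (r.1.items, r.2)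

-- ===== PORT B =====
-- literal port of B: output = {c: string.count(c) for c in string}; return output, len(output)
def solve_alt (string : String) : (List (String × Int)) × Int :=
  let output := string.toList.foldl
    (fun (d : PySem.Dict String Int) c =>
      d.insert (String.ofList [c]) ((PySem.Str.count string (String.ofList [c]) : Int)))
    PySem.Dict.empty
  (output.items, (output.size : Int))

-- ===== PRECONDITION & SPEC =====
def Spec_solve (string : String) (out : (List (String × Int)) × Int) : Prop := out = solve_alt string
instance (string : String) (out : (List (String × Int)) × Int) : Decidable (Spec_solve string out) := by unfold Spec_solve; infer_instance

-- ===== CLAIM (what is proved, stated in full; the proofs are below) =====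
def Claim_equal_solve : Prop := ∀ (string : String), Dom_solve string → Spec_solve string (solve string)

-- ===== LEMMAS AND PROOFS =====

theorem key_injective : Function.Injective (fun c => String.ofList [c]) := by
  intro a b h
  have h2 := congrArg String.toList h
  simp only [String.toList_ofList] at h2
  exact List.singleton_injective h2

theorem size_eq_keys_length {κ ν : Type} [BEq κ] (d : PySem.Dict κ ν) :
    d.size = d.keys.length := by
  simp [PySem.Dict.size, PySem.Dict.keys]

-- Chars.count.go with a single-character needle counts occurrences of that character.
theorem count_go_singleton (c : Char) :
    ∀ (l : List Char) (fuel acc : Nat), l.length ≤ fuel →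
      PySem.Chars.count.go [c] fuel l acc = acc + l.count c := by
  intro l
  induction l with
  | nil =>
    intro fuel acc _
    cases fuel <;> simp [PySem.Chars.count.go]
  | cons h t ih =>
    intro fuel acc hle
    cases fuel with
    | zero => simp at hle
    | succ f =>
      rw [PySem.Chars.count.go]
      simp only [List.length_cons] at hle
      by_cases hch : c = h
      · subst hch
        rw [if_pos (by simp [List.isPrefixOf])]
        rw [show List.drop [c].length (c :: t) = t by simp]
        rw [ih f (acc + 1) (by omega)]
        simp
        omega
      · rw [if_neg (by simp [List.isPrefixOf, hch])]
        rw [ih f acc (by omega)]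
        simp [Ne.symm hch]

theorem chars_count_singleton (cs : List Char) (c : Char) :
    PySem.Chars.count cs [c] = cs.count c := by
  rw [PySem.Chars.count]
  simp only [List.isEmpty_cons, Bool.false_eq_true, if_false]
  simpa using count_go_singleton c cs cs.length 0 (le_refl _)

-- invariant for A's loop: the dict is the (keyed) counter of the processed prefix and the
-- running count is the dict's size
theorem foldA (cs : List Char) :
    ∀ (d : PySem.Dict String Int) (n : Int), d.keys.Nodup → n = (d.size : Int) →
      ∀ p, p = cs.foldl
        (fun (st : PySem.Dict String Int × Int) i =>
          if (String.ofList [i]) ∉ st.1.keys then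
            (st.1.insert (String.ofList [i]) 1, st.2 + 1)
          else
            (st.1.modify (String.ofList [i]) 0 (· + 1), st.2))
        (d, n) →
      p.1.keys.Nodup
      ∧ p.1.keys = PySem.Set.update d.keys (cs.map (fun c => String.ofList [c]))
      ∧ (∀ k, p.1.getD k 0 = d.getD k 0 + ((cs.map (fun c => String.ofList [c])).count k : Int))
      ∧ p.2 = (p.1.size : Int) := by
  induction cs with
  | nil =>
    intro d n hnd hn p hp
    subst hp
    exact ⟨hnd, by simp [PySem.Set.update], by simp, hn⟩
  | cons c t ih =>
    intro d n hnd hn p hp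
    rw [List.foldl_cons] at hp
    by_cases hmem : (String.ofList [c]) ∈ d.keys
    · -- already a key: modify branch
      have hcont : d.contains (String.ofList [c]) = true :=
        (PySem.Dict.contains_iff_mem_keys d _).mpr hmem
      rw [if_neg (by simpa using hmem)] at hp
      set d' := d.modify (String.ofList [c]) 0 (· + 1) with hd'
      have hkeys' : d'.keys = d.keys := by
        rw [hd', PySem.Dict.keys_modify, PySem.Dict.keys_insert_of_contains _ _ hcont]
      have hnd' : d'.keys.Nodup := by rw [hkeys']; exact hnd
      have hn' : n = (d'.size : Int) := by
        rw [hn, size_eq_keys_length, size_eq_keys_length, hkeys']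
      obtain ⟨h1, h2, h3, h4⟩ := ih d' n hnd' hn' p hp
      refine ⟨h1, ?_, ?_, h4⟩
      · rw [h2, hkeys', List.map_cons, PySem.Set.update_cons]
        congr 1
        simp [PySem.Set.add, hmem]
      · intro k
        rw [h3 k, hd', PySem.Dict.getD_modify]
        by_cases hk : k = String.ofList [c]
        · subst hk
          simp
          omega
        · simp [hk, Ne.symm hk]
    · -- new key: insert branch
      have hcont : d.contains (String.ofList [c]) = false := by
        by_contra h
        exact hmem ((PySem.Dict.contains_iff_mem_keys d _).mp
          (by revert h; cases d.contains (String.ofList [c]) <;> simp))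
      rw [if_pos (by simpa using hmem)] at hp
      set d' := d.insert (String.ofList [c]) 1 with hd'
      have hkeys' : d'.keys = d.keys ++ [String.ofList [c]] := by
        rw [hd', PySem.Dict.keys_insert_of_not_contains _ _ hcont]
      have hnd' : d'.keys.Nodup := PySem.Dict.nodup_keys_insert _ _ _ hnd
      have hn' : n + 1 = (d'.size : Int) := by
        rw [hd', PySem.Dict.size_insert, hcont, hn]
        simp
      obtain ⟨h1, h2, h3, h4⟩ := ih d' (n + 1) hnd' hn' p hp
      refine ⟨h1, ?_, ?_, h4⟩
      · rw [h2, hkeys', List.map_cons, PySem.Set.update_cons]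
        congr 1
        simp [PySem.Set.add, hmem]
      · intro k
        rw [h3 k, hd', PySem.Dict.getD_insert]
        by_cases hk : k = String.ofList [c]
        · subst hk
          rw [PySem.Dict.getD_of_not_contains _ _ hcont]
          simp
          omega
        · simp [hk, Ne.symm hk]

-- lookup after B's insert loop: the last (= any) inserted value for a present key
theorem getD_foldl_insert_fun (g : String → Int) :
    ∀ (l : List String) (d : PySem.Dict String Int) (k : String),
      (l.foldl (fun d k => d.insert k (g k)) d).getD k 0
        = if k ∈ l then g k else d.getD k 0 := by
  intro l
  induction l with
  | nil => intro d k; simp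
  | cons x t ih =>
    intro d k
    rw [List.foldl_cons, ih]
    by_cases hkt : k ∈ t
    · simp [hkt]
    · by_cases hkx : k = x
      · subst hkx; simp [hkt]
      · simp [hkt, hkx, PySem.Dict.getD_insert]

-- ===== VERDICT (by name: the statement is the Claim_ definition above) =====
theorem solve_spec : Claim_equal_solve := by
  intro s _
  simp only [Spec_solve, solve, solve_alt]
  set key : Char → String := fun c => String.ofList [c] with hkey
  set cs := s.toList with hcs
  -- B's fold, re-read as a fold over the mapped keys
  have hBfold : cs.foldl
      (fun (d : PySem.Dict String Int) c =>
        d.insert (String.ofList [c]) ((PySem.Str.count s (String.ofList [c]) : Int)))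
      PySem.Dict.empty
      = (cs.map key).foldl
          (fun (d : PySem.Dict String Int) k =>
            d.insert k ((PySem.Str.count s k : Int)))
          PySem.Dict.empty := by
    rw [List.foldl_map]
  set rB := (cs.map key).foldl
      (fun (d : PySem.Dict String Int) k => d.insert k ((PySem.Str.count s k : Int)))
      PySem.Dict.empty with hrB
  have hBkeys : rB.keys = PySem.Set.update PySem.Dict.empty.keys (cs.map key) :=
    PySem.Dict.keys_foldl_insert _ _ _
  have hBnd : rB.keys.Nodup :=
    PySem.Dict.nodup_keys_foldl_insert _ _ _ (by simp)
  set rA := cs.foldl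
    (fun (st : PySem.Dict String Int × Int) i =>
      if (String.ofList [i]) ∉ st.1.keys then
        (st.1.insert (String.ofList [i]) 1, st.2 + 1)
      else
        (st.1.modify (String.ofList [i]) 0 (· + 1), st.2))
    (PySem.Dict.empty, 0) with hrA
  obtain ⟨hAnd, hAkeys, hAgetD, hAcnt⟩ :=
    foldA cs PySem.Dict.empty 0 (by simp) (by simp) rA hrA
  have hkeq : rA.1.keys = rB.keys := by rw [hAkeys, hBkeys]
  have hval : ∀ k ∈ rA.1.keys, rA.1.getD k 0 = rB.getD k 0 := by
    intro k hk
    have hkmem : k ∈ cs.map key := by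
      rw [hAkeys] at hk
      have := (PySem.Set.mem_update _ _ _).mp hk
      simpa using this
    obtain ⟨c, hc, hck⟩ := List.mem_map.mp hkmem
    rw [hAgetD k, hrB, getD_foldl_insert_fun, if_pos hkmem]
    subst hck
    have hcount : PySem.Str.count s (key c) = cs.count c := by
      rw [PySem.Str.count_eq]
      have h1 : (key c).toList = [c] := by rw [hkey]; exact String.toList_ofList
      rw [h1, ← hcs]
      exact chars_count_singleton cs c
    rw [hcount]
    have hcm : (cs.map key).count (key c) = cs.count c :=
      List.count_map_of_injective cs key key_injective c
    rw [hcm]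
    simp
  have hitems : rA.1.items = rB.items := by
    rw [PySem.Dict.items_eq_map_keys rA.1 hAnd 0,
        PySem.Dict.items_eq_map_keys rB hBnd 0, hkeq]
    exact List.map_congr_left (fun k hk => by rw [hval k (hkeq ▸ hk)])
  have hsz : rA.2 = (rB.size : Int) := by
    rw [hAcnt, size_eq_keys_length, size_eq_keys_length, hkeq]
  rw [hBfold]
  exact Prod.ext hitems hsz
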